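-- pv_equiv track=rewrite | github.com/sanma-icfpc/icfpc2024 | scripts/lambdaman_greedy.py | find_nearest_pill
-- ===== SOURCE A (Python) =====
-- from collections import deque
--
-- directions = {'U': (-1, 0), 'R': (0, 1), 'D': (1, 0), 'L': (0, -1)}
--
-- def bfs(grid, start_position, target_position):
--     queue = deque([(start_position, "")])
--     visited = set()
--     visited.add(start_position)
--
--     while queue:
--         current_position, path = queue.popleft()
--         if current_position == target_position:
--             return path
--
--         for move, (dx, dy) in directions.items():
--             new_position = (current_position[0] + dx, current_position[1] + dy)
--             try:
--                 if grid[new_position[0]][new_position[1]] != '#' and new_position not in visited: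
--                     visited.add(new_position)
--                     queue.append((new_position, path + move))
--             except IndexError:
--                 pass
--
--     return None
--
-- def find_nearest_pill(grid, current_position, pill_positions):
--     shortest_path = None
--     nearest_pill = None
--
--     for pill in pill_positions:
--         path = bfs(grid, current_position, pill)
--         if path is not None and (shortest_path is None or len(path) < len(shortest_path)):
--             shortest_path = path
--             nearest_pill = pill
--
--     return nearest_pill, shortest_path
-- ===== SOURCE B (Python) =====
-- # B: ONE breadth-first search from current_position, processed layer by layer
-- # (whole frontier at a time) while recording the first path to every reachable
-- # cell, then min() over the reachable pills (one traversal instead of one per pill).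
-- from collections import deque
--
-- directions = {'U': (-1, 0), 'R': (0, 1), 'D': (1, 0), 'L': (0, -1)}
--
-- def find_nearest_pill(grid, current_position, pill_positions):
--     paths = {current_position: ""}
--     frontier = [current_position]
--     while frontier:
--         next_frontier = []
--         for pos in frontier:
--             path = paths[pos]
--             for move, (dx, dy) in directions.items():
--                 np = (pos[0] + dx, pos[1] + dy)
--                 if np in paths:
--                     continue
--                 try:
--                     if grid[np[0]][np[1]] != '#':
--                         paths[np] = path + move
--                         next_frontier.append(np)
--                 except IndexError:
--                     pass
--         frontier = next_frontier
--     reachable = [(pill, paths[pill]) for pill in pill_positions if pill in paths]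
--     best = min(reachable, key=lambda t: len(t[1]), default=None)
--     if best is None:
--         return None, None
--     return best
-- ===== Notes on version B (the rewrite author's own statement) =====
-- stated objective: alternative
-- what changed: A runs a separate full BFS from the current position for every pill; B runs ONE layer-by-layer BFS from the current position recording the first (shortest) path to every reachable cell in a dict, then picks the nearest pill with min() over a comprehension of the reachable pills.
import Mathlib
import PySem

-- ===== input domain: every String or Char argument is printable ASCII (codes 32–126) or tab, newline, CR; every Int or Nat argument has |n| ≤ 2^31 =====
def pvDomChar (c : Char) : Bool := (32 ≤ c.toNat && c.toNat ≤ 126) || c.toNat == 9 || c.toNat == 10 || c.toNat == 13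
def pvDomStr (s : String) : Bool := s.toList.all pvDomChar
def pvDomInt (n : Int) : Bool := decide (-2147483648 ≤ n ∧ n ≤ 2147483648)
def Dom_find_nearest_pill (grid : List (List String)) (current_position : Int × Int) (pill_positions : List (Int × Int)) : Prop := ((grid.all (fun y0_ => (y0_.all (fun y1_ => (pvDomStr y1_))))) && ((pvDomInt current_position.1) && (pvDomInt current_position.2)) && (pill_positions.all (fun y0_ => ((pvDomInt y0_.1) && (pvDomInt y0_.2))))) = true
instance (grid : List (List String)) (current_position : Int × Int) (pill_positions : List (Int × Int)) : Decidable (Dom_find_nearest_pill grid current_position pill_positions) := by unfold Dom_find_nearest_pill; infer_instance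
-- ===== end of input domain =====

-- B replaces A's per-pill BFS (one full search per pill) by a single layer-by-layer
-- BFS from the current position that records the first (= shortest, in A's direction
-- order) path to every reachable cell in a dict, then selects the nearest pill with
-- min() over the reachable pills (alternative algorithm: one traversal instead of one per pill).


-- directions = {'U': (-1, 0), 'R': (0, 1), 'D': (1, 0), 'L': (0, -1)}  (items order; shared module constant)
def pvDirs : List (String × (Int × Int)) := [("U", (-1, 0)), ("R", (0, 1)), ("D", (1, 0)), ("L", (0, -1))]

-- fuel bounds for the two while-loops (totality guards only: each exceeds the number
-- of iterations its Python loop can ever perform, see the size-bound lemma below)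
def pvMaxRowLen (grid : List (List String)) : Nat := grid.foldl (fun m row => max m row.length) 0
def pvFuel (grid : List (List String)) : Nat := 4 * grid.length * pvMaxRowLen grid + 2
def pvFuelB (grid : List (List String)) : Nat := 4 * grid.length * pvMaxRowLen grid + 3

-- ===== PORT A =====
-- body of A's inner 'for move, (dx, dy) in directions.items()' loop; the try/except
-- IndexError around grid[x][y] is the two pyGet? matches (none = IndexError → pass)
def pvStepA (grid : List (List String)) (cur : Int × Int) (path : String)
    (st : PySem.Set (Int × Int) × List ((Int × Int) × String)) (d : String × (Int × Int)) :
    PySem.Set (Int × Int) × List ((Int × Int) × String) :=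
  let np : Int × Int := (cur.1 + d.2.1, cur.2 + d.2.2)
  match PySem.List.pyGet? grid np.1 with
  | none => st
  | some row =>
    match PySem.List.pyGet? row np.2 with
    | none => st
    | some cell =>
      if cell ≠ "#" ∧ PySem.Set.contains st.1 np = false then
        (PySem.Set.add st.1 np, st.2 ++ [(np, path ++ d.1)])
      else st

-- A's 'while queue:' loop (fuel is a totality guard only, never reached on A's runs)
def pvBfsLoopA (grid : List (List String)) (target : Int × Int) :
    Nat → List ((Int × Int) × String) → PySem.Set (Int × Int) → Option String
  | _, [], _ => none
  | 0, _ :: _, _ => none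
  | fuel + 1, (cur, path) :: rest, visited =>
    if cur = target then some path
    else
      let st := pvDirs.foldl (pvStepA grid cur path) (visited, rest)
      pvBfsLoopA grid target fuel st.2 st.1

def pvBfs (grid : List (List String)) (start_position target_position : Int × Int) : Option String :=
  pvBfsLoopA grid target_position (pvFuel grid) [(start_position, "")]
    (PySem.Set.add PySem.Set.empty start_position)

def find_nearest_pill (grid : List (List String)) (current_position : Int × Int) (pill_positions : List (Int × Int)) : (Option (Int × Int)) × Option String :=
  pill_positions.foldl (fun acc pill =>
    match pvBfs grid current_position pill, acc.2 with
    | some p, none => (some pill, some p)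
    | some p, some sp => if PySem.Str.len p < PySem.Str.len sp then (some pill, some p) else acc
    | none, _ => acc) (none, none)

-- ===== PORT B =====
-- body of B's inner directions loop: 'if np in paths: continue', else try the grid
def pvStepB (grid : List (List String)) (cur : Int × Int) (path : String)
    (st : PySem.Dict (Int × Int) String × List (Int × Int)) (d : String × (Int × Int)) :
    PySem.Dict (Int × Int) String × List (Int × Int) :=
  let np : Int × Int := (cur.1 + d.2.1, cur.2 + d.2.2)
  if st.1.contains np = true then st
  else
    match PySem.List.pyGet? grid np.1 with
    | none => st
    | some row =>
      match PySem.List.pyGet? row np.2 with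
      | none => st
      | some cell =>
        if cell ≠ "#" then (st.1.insert np (path ++ d.1), st.2 ++ [np]) else st

-- body of B's 'for pos in frontier:' loop over one frontier position
-- (path = paths[pos] is ported as getD: every frontier position was recorded when enqueued)
def pvLayerStep (grid : List (List String))
    (st : PySem.Dict (Int × Int) String × List (Int × Int)) (pos : Int × Int) :
    PySem.Dict (Int × Int) String × List (Int × Int) :=
  pvDirs.foldl (pvStepB grid pos (st.1.getD pos "")) st

-- B's 'while frontier:' loop, one recursive call per BFS layer
-- (fuel is a totality guard only, never reached on B's runs)
def pvBfsLayers (grid : List (List String)) :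
    Nat → PySem.Dict (Int × Int) String → List (Int × Int) → PySem.Dict (Int × Int) String
  | _, paths, [] => paths
  | 0, paths, _ :: _ => paths
  | fuel + 1, paths, cur :: rest =>
    let st := (cur :: rest).foldl (pvLayerStep grid) (paths, [])
    pvBfsLayers grid fuel st.1 st.2

def find_nearest_pill_alt (grid : List (List String)) (current_position : Int × Int) (pill_positions : List (Int × Int)) : (Option (Int × Int)) × Option String :=
  let paths := pvBfsLayers grid (pvFuelB grid) (PySem.Dict.empty.insert current_position "") [current_position]
  let reachable := pill_positions.filterMap (fun pill => (paths.get? pill).map (fun p => (pill, p)))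
  match PySem.List.min? reachable (fun t => PySem.Str.len t.2) with
  | none => (none, none)
  | some best => (some best.1, some best.2)

-- ===== PRECONDITION & SPEC =====
def Spec_find_nearest_pill (grid : List (List String)) (current_position : Int × Int) (pill_positions : List (Int × Int)) (out : (Option (Int × Int)) × Option String) : Prop := out = find_nearest_pill_alt grid current_position pill_positions
instance (grid : List (List String)) (current_position : Int × Int) (pill_positions : List (Int × Int)) (out : (Option (Int × Int)) × Option String) : Decidable (Spec_find_nearest_pill grid current_position pill_positions out) := by unfold Spec_find_nearest_pill; infer_instance

-- ===== CLAIM (what is proved, stated in full; the proofs are below) =====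
def Claim_equal_find_nearest_pill : Prop := ∀ (grid : List (List String)) (current_position : Int × Int) (pill_positions : List (Int × Int)), Dom_find_nearest_pill grid current_position pill_positions → Spec_find_nearest_pill grid current_position pill_positions (find_nearest_pill grid current_position pill_positions)

-- ===== LEMMAS AND PROOFS =====

-- a position whose grid cell exists (both indexings succeed, Python-style)
def pvValid (grid : List (List String)) (p : Int × Int) : Prop :=
  ∃ row, PySem.List.pyGet? grid p.1 = some row ∧ (PySem.List.pyGet? row p.2).isSome

-- B's layer, resumed mid-layer: positions 'rest' of the current frontier remain,
-- 'acc' is the next frontier built so far (proof-side helper only)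
def pvLayCont (grid : List (List String)) (fuelL : Nat) (rest acc : List (Int × Int))
    (paths : PySem.Dict (Int × Int) String) : PySem.Dict (Int × Int) String :=
  let st := rest.foldl (pvLayerStep grid) (paths, acc)
  pvBfsLayers grid fuelL st.1 st.2

lemma pv_pyGet?_bounds {α : Type} {xs : List α} {i : Int} {x : α}
    (h : PySem.List.pyGet? xs i = some x) : -(xs.length : Int) ≤ i ∧ i < xs.length := by
  simp only [PySem.List.pyGet?, Option.bind_eq_some_iff] at h
  obtain ⟨k, hk, -⟩ := h
  unfold PySem.List.pyIdx? at hk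
  split_ifs at hk <;> omega

lemma pv_foldmax_init (l : List (List String)) :
    ∀ (acc : Nat), acc ≤ l.foldl (fun m row => max m row.length) acc := by
  induction l with
  | nil => simp
  | cons r t ih => intro acc; exact le_trans (le_max_left _ _) (ih _)

lemma pv_rowlen_le {grid : List (List String)} {row : List String} (h : row ∈ grid) :
    row.length ≤ pvMaxRowLen grid := by
  unfold pvMaxRowLen
  generalize (0 : Nat) = acc
  induction grid generalizing acc with
  | nil => cases h
  | cons r t ih =>
    rcases List.mem_cons.mp h with rfl | hm
    · exact le_trans (le_max_right _ _) (pv_foldmax_init t _)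
    · exact ih hm _

-- at most 4·n·M + 1 distinct positions can ever be recorded (start + valid cells)
lemma pv_keys_le (grid : List (List String)) (start : Int × Int) (keys : List (Int × Int))
    (hnd : keys.Nodup) (hv : ∀ k ∈ keys, k = start ∨ pvValid grid k) :
    keys.length ≤ 4 * grid.length * pvMaxRowLen grid + 1 := by
  classical
  set n := grid.length with hn
  set M := pvMaxRowLen grid with hM
  have hsub : keys.toFinset ⊆
      insert start ((Finset.Icc (-(n : Int)) ((n : Int) - 1)) ×ˢ
        (Finset.Icc (-(M : Int)) ((M : Int) - 1))) := by
    intro k hk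
    rcases hv k (List.mem_toFinset.mp hk) with rfl | ⟨row, hrow, hcell⟩
    · exact Finset.mem_insert_self _ _
    · apply Finset.mem_insert_of_mem
      obtain ⟨cell, hc⟩ := Option.isSome_iff_exists.mp hcell
      have hx := pv_pyGet?_bounds hrow
      have hy := pv_pyGet?_bounds hc
      have hrl : row.length ≤ M := pv_rowlen_le (PySem.List.mem_of_pyGet?_eq_some grid hrow)
      rw [Finset.mem_product, Finset.mem_Icc, Finset.mem_Icc]
      constructor <;> constructor <;> omega
  have h1 : keys.length = keys.toFinset.card := (List.toFinset_card_of_nodup hnd).symm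
  have h2 := Finset.card_le_card hsub
  have h3 := Finset.card_insert_le start
    ((Finset.Icc (-(n : Int)) ((n : Int) - 1)) ×ˢ (Finset.Icc (-(M : Int)) ((M : Int) - 1)))
  rw [Finset.card_product, Int.card_Icc, Int.card_Icc] at h3
  have h4 : (((n : Int) - 1 + 1 - -(n : Int)).toNat) = 2 * n := by omega
  have h5 : (((M : Int) - 1 + 1 - -(M : Int)).toNat) = 2 * M := by omega
  rw [h4, h5] at h3
  calc keys.length = keys.toFinset.card := h1
    _ ≤ _ := h2
    _ ≤ 2 * n * (2 * M) + 1 := h3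
    _ = 4 * n * M + 1 := by ring_nf

lemma pv_keys_length (d : PySem.Dict (Int × Int) String) : d.keys.length = d.size := by
  simp [PySem.Dict.keys, PySem.Dict.size]

lemma pv_mem_keys_of_isSome {d : PySem.Dict (Int × Int) String} {k : Int × Int}
    (h : (d.get? k).isSome) : k ∈ d.keys := by
  by_contra hk
  rw [← PySem.Dict.get?_eq_none_iff_not_mem_keys] at hk
  simp [hk] at h

lemma pv_stepB_mono (grid : List (List String)) (cur : Int × Int) (path : String)
    (st : PySem.Dict (Int × Int) String × List (Int × Int)) (d : String × (Int × Int))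
    (k : Int × Int) (h : (st.1.get? k).isSome) :
    (pvStepB grid cur path st d).1.get? k = st.1.get? k := by
  unfold pvStepB
  by_cases hc : st.1.contains (cur.1 + d.2.1, cur.2 + d.2.2) = true
  · simp [hc]
  · simp only [Bool.not_eq_true] at hc
    have hne : k ≠ (cur.1 + d.2.1, cur.2 + d.2.2) := by
      intro rfl'
      have := pv_mem_keys_of_isSome h
      rw [← PySem.Dict.contains_iff_mem_keys] at this
      rw [rfl'] at this
      simp [hc] at this
    cases hg : PySem.List.pyGet? grid (cur.1 + d.2.1) with
    | none => simp [hc, hg]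
    | some row =>
      cases hr : PySem.List.pyGet? row (cur.2 + d.2.2) with
      | none => simp [hc, hg, hr]
      | some cell =>
        by_cases hcell : cell = "#"
        · simp [hc, hg, hr, hcell]
        · simp [hc, hg, hr, hcell, PySem.Dict.get?_insert_of_ne _ _ hne]

lemma pv_foldB_mono (grid : List (List String)) (cur : Int × Int) (path : String)
    (ds : List (String × (Int × Int))) (st : PySem.Dict (Int × Int) String × List (Int × Int))
    (k : Int × Int) (h : (st.1.get? k).isSome) :
    (ds.foldl (pvStepB grid cur path) st).1.get? k = st.1.get? k := by
  induction ds generalizing st with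
  | nil => rfl
  | cons d t ih =>
    have h1 := pv_stepB_mono grid cur path st d k h
    rw [List.foldl_cons, ih _ (by rw [h1]; exact h), h1]

lemma pv_layerstep_mono (grid : List (List String))
    (st : PySem.Dict (Int × Int) String × List (Int × Int)) (pos : Int × Int)
    (k : Int × Int) (h : (st.1.get? k).isSome) :
    (pvLayerStep grid st pos).1.get? k = st.1.get? k :=
  pv_foldB_mono grid pos (st.1.getD pos "") pvDirs st k h

lemma pv_restfold_mono (grid : List (List String)) (rest : List (Int × Int))
    (st : PySem.Dict (Int × Int) String × List (Int × Int))
    (k : Int × Int) (h : (st.1.get? k).isSome) :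
    (rest.foldl (pvLayerStep grid) st).1.get? k = st.1.get? k := by
  induction rest generalizing st with
  | nil => rfl
  | cons pos t ih =>
    have h1 := pv_layerstep_mono grid st pos k h
    rw [List.foldl_cons, ih _ (by rw [h1]; exact h), h1]

lemma pv_layers_mono (grid : List (List String)) (fuel : Nat)
    (paths : PySem.Dict (Int × Int) String) (frontier : List (Int × Int))
    (k : Int × Int) (h : (paths.get? k).isSome) :
    (pvBfsLayers grid fuel paths frontier).get? k = paths.get? k := by
  induction fuel generalizing paths frontier with
  | zero => cases frontier <;> rfl
  | succ fuel ih =>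
    cases frontier with
    | nil => rfl
    | cons cur rest =>
      rw [pvBfsLayers]
      have h1 := pv_restfold_mono grid (cur :: rest) (paths, []) k h
      rw [ih _ _ (by rw [h1]; exact h), h1]

lemma pv_laycont_mono (grid : List (List String)) (fuelL : Nat) (rest acc : List (Int × Int))
    (paths : PySem.Dict (Int × Int) String) (k : Int × Int) (h : (paths.get? k).isSome) :
    (pvLayCont grid fuelL rest acc paths).get? k = paths.get? k := by
  unfold pvLayCont
  have h1 := pv_restfold_mono grid rest (paths, acc) k h
  rw [pv_layers_mono grid fuelL _ _ k (by rw [h1]; exact h), h1]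

lemma pv_stepB_queue (grid : List (List String)) (cur : Int × Int) (path : String)
    (st : PySem.Dict (Int × Int) String × List (Int × Int)) (d : String × (Int × Int)) :
    st.2 <+: (pvStepB grid cur path st d).2 := by
  unfold pvStepB
  by_cases hc : st.1.contains (cur.1 + d.2.1, cur.2 + d.2.2) = true
  · simp [hc]
  · cases hg : PySem.List.pyGet? grid (cur.1 + d.2.1) with
    | none => simp [hc, hg]
    | some row =>
      cases hr : PySem.List.pyGet? row (cur.2 + d.2.2) with
      | none => simp [hc, hg, hr]
      | some cell =>
        by_cases hcell : cell = "#"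
        · simp [hc, hg, hr, hcell]
        · simp [hc, hg, hr, hcell, List.prefix_append]

lemma pv_foldB_queue (grid : List (List String)) (cur : Int × Int) (path : String)
    (ds : List (String × (Int × Int))) (st : PySem.Dict (Int × Int) String × List (Int × Int)) :
    st.2 <+: (ds.foldl (pvStepB grid cur path) st).2 := by
  induction ds generalizing st with
  | nil => exact List.prefix_refl _
  | cons d t ih =>
    exact List.IsPrefix.trans (pv_stepB_queue grid cur path st d) (ih _)

-- the dict produced by a direction step, and the items it appends, do not depend on
-- what is already sitting in the queue: a queue prefix passes through unchanged
lemma pv_stepB_prepend (grid : List (List String)) (cur : Int × Int) (path : String)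
    (paths : PySem.Dict (Int × Int) String) (q1 q2 : List (Int × Int)) (d : String × (Int × Int)) :
    pvStepB grid cur path (paths, q1 ++ q2) d
      = ((pvStepB grid cur path (paths, q2) d).1, q1 ++ (pvStepB grid cur path (paths, q2) d).2) := by
  unfold pvStepB
  by_cases hc : paths.contains (cur.1 + d.2.1, cur.2 + d.2.2) = true
  · simp [hc]
  · cases hg : PySem.List.pyGet? grid (cur.1 + d.2.1) with
    | none => simp [hc, hg]
    | some row =>
      cases hr : PySem.List.pyGet? row (cur.2 + d.2.2) with
      | none => simp [hc, hg, hr]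
      | some cell =>
        by_cases hcell : cell = "#"
        · simp [hc, hg, hr, hcell]
        · simp [hc, hg, hr, hcell]

lemma pv_foldB_prepend (grid : List (List String)) (cur : Int × Int) (path : String)
    (ds : List (String × (Int × Int))) (paths : PySem.Dict (Int × Int) String)
    (q1 q2 : List (Int × Int)) :
    ds.foldl (pvStepB grid cur path) (paths, q1 ++ q2)
      = ((ds.foldl (pvStepB grid cur path) (paths, q2)).1,
         q1 ++ (ds.foldl (pvStepB grid cur path) (paths, q2)).2) := by
  induction ds generalizing paths q2 with
  | nil => rfl
  | cons d t ih =>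
    rw [List.foldl_cons, List.foldl_cons, pv_stepB_prepend]
    exact ih _ _

-- the two direction loops run in lock-step: A's (visited, queue-of-(pos,path)) state
-- is the image of B's (paths, queue-of-pos) state, and B's invariants are preserved
lemma pv_expand_rel (grid : List (List String)) (start cur : Int × Int) (path : String)
    (ds : List (String × (Int × Int))) (paths : PySem.Dict (Int × Int) String)
    (qB : List (Int × Int))
    (hnd : paths.keys.Nodup)
    (hq : ∀ p ∈ qB, (paths.get? p).isSome)
    (hv : ∀ k ∈ paths.keys, k = start ∨ pvValid grid k) :
    ds.foldl (pvStepA grid cur path) (paths.keys, qB.map (fun p => (p, paths.getD p "")))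
      = ((ds.foldl (pvStepB grid cur path) (paths, qB)).1.keys,
         (ds.foldl (pvStepB grid cur path) (paths, qB)).2.map
           (fun p => (p, (ds.foldl (pvStepB grid cur path) (paths, qB)).1.getD p ""))) ∧
    (ds.foldl (pvStepB grid cur path) (paths, qB)).1.keys.Nodup ∧
    (∀ p ∈ (ds.foldl (pvStepB grid cur path) (paths, qB)).2,
      ((ds.foldl (pvStepB grid cur path) (paths, qB)).1.get? p).isSome) ∧
    (∀ k ∈ (ds.foldl (pvStepB grid cur path) (paths, qB)).1.keys, k = start ∨ pvValid grid k) ∧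
    (∀ k ∈ (ds.foldl (pvStepB grid cur path) (paths, qB)).1.keys,
      k ∈ paths.keys ∨ k ∈ (ds.foldl (pvStepB grid cur path) (paths, qB)).2) ∧
    (ds.foldl (pvStepB grid cur path) (paths, qB)).2.length + paths.size
      = qB.length + (ds.foldl (pvStepB grid cur path) (paths, qB)).1.size := by
  induction ds generalizing paths qB with
  | nil =>
    refine ⟨rfl, hnd, hq, hv, fun k hk => Or.inl hk, rfl⟩
  | cons d t ih =>
    simp only [List.foldl_cons]
    by_cases hmem : (cur.1 + d.2.1, cur.2 + d.2.2) ∈ paths.keys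
    · -- already recorded: both sides skip this direction
      have hcB : paths.contains (cur.1 + d.2.1, cur.2 + d.2.2) = true :=
        (PySem.Dict.contains_iff_mem_keys _ _).mpr hmem
      have hcA : PySem.Set.contains paths.keys (cur.1 + d.2.1, cur.2 + d.2.2) = true :=
        (PySem.Set.contains_iff _ _).mpr hmem
      have hB : pvStepB grid cur path (paths, qB) d = (paths, qB) := by
        simp [pvStepB, hcB]
      have hA : pvStepA grid cur path (paths.keys, qB.map (fun p => (p, paths.getD p ""))) d
          = (paths.keys, qB.map (fun p => (p, paths.getD p ""))) := by
        unfold pvStepA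
        cases hg : PySem.List.pyGet? grid (cur.1 + d.2.1) with
        | none => simp [hg]
        | some row =>
          cases hr : PySem.List.pyGet? row (cur.2 + d.2.2) with
          | none => simp [hg, hr]
          | some cell =>
            simp [hg, hr]
            exact fun _ => hmem
      rw [hA, hB]
      exact ih paths qB hnd hq hv
    · cases hg : PySem.List.pyGet? grid (cur.1 + d.2.1) with
      | none =>
        have hB : pvStepB grid cur path (paths, qB) d = (paths, qB) := by
          simp [pvStepB, hg]
        have hA : pvStepA grid cur path (paths.keys, qB.map (fun p => (p, paths.getD p ""))) d
            = (paths.keys, qB.map (fun p => (p, paths.getD p ""))) := by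
          simp [pvStepA, hg]
        rw [hA, hB]
        exact ih paths qB hnd hq hv
      | some row =>
        cases hr : PySem.List.pyGet? row (cur.2 + d.2.2) with
        | none =>
          have hB : pvStepB grid cur path (paths, qB) d = (paths, qB) := by
            simp [pvStepB, hg, hr]
          have hA : pvStepA grid cur path (paths.keys, qB.map (fun p => (p, paths.getD p ""))) d
              = (paths.keys, qB.map (fun p => (p, paths.getD p ""))) := by
            simp [pvStepA, hg, hr]
          rw [hA, hB]
          exact ih paths qB hnd hq hv
        | some cell =>
          by_cases hcell : cell = "#"
          · have hB : pvStepB grid cur path (paths, qB) d = (paths, qB) := by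
              simp [pvStepB, hg, hr, hcell]
            have hA : pvStepA grid cur path (paths.keys, qB.map (fun p => (p, paths.getD p ""))) d
                = (paths.keys, qB.map (fun p => (p, paths.getD p ""))) := by
              simp [pvStepA, hg, hr, hcell]
            rw [hA, hB]
            exact ih paths qB hnd hq hv
          · -- a fresh reachable cell: both sides record and enqueue it
            have hcB : paths.contains (cur.1 + d.2.1, cur.2 + d.2.2) = false := by
              rw [← Bool.not_eq_true, PySem.Dict.contains_iff_mem_keys]; exact hmem
            have hcA : PySem.Set.contains paths.keys (cur.1 + d.2.1, cur.2 + d.2.2) = false := by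
              rw [← Bool.not_eq_true, PySem.Set.contains_iff]; exact hmem
            have hB : pvStepB grid cur path (paths, qB) d
                = (paths.insert (cur.1 + d.2.1, cur.2 + d.2.2) (path ++ d.1),
                   qB ++ [(cur.1 + d.2.1, cur.2 + d.2.2)]) := by
              simp [pvStepB, hcB, hg, hr, hcell]
            have hA : pvStepA grid cur path (paths.keys, qB.map (fun p => (p, paths.getD p ""))) d
                = (paths.keys ++ [(cur.1 + d.2.1, cur.2 + d.2.2)],
                   qB.map (fun p => (p, paths.getD p ""))
                     ++ [((cur.1 + d.2.1, cur.2 + d.2.2), path ++ d.1)]) := by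
              simp [pvStepA, hg, hr, hcell, PySem.Set.add_of_not_mem hmem]
              exact hmem
            rw [hA, hB]
            have hne : ∀ p ∈ qB, p ≠ (cur.1 + d.2.1, cur.2 + d.2.2) := by
              intro p hp heq
              exact hmem (heq ▸ pv_mem_keys_of_isSome (hq p hp))
            have hkeys' : (paths.insert (cur.1 + d.2.1, cur.2 + d.2.2) (path ++ d.1)).keys
                = paths.keys ++ [(cur.1 + d.2.1, cur.2 + d.2.2)] :=
              PySem.Dict.keys_insert_of_not_contains _ _ hcB
            have hnd' : (paths.insert (cur.1 + d.2.1, cur.2 + d.2.2) (path ++ d.1)).keys.Nodup := by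
              rw [hkeys', List.nodup_append]
              refine ⟨hnd, List.nodup_singleton _, fun x hx y hy heq => ?_⟩
              exact hmem ((heq.trans (List.mem_singleton.mp hy)) ▸ hx)
            have hq' : ∀ p ∈ qB ++ [(cur.1 + d.2.1, cur.2 + d.2.2)],
                (((paths.insert (cur.1 + d.2.1, cur.2 + d.2.2) (path ++ d.1))).get? p).isSome := by
              intro p hp
              rcases List.mem_append.mp hp with hp | hp
              · rw [PySem.Dict.get?_insert_of_ne _ _ (hne p hp)]
                exact hq p hp
              · rw [List.mem_singleton.mp hp, PySem.Dict.get?_insert_self]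
                rfl
            have hv' : ∀ k ∈ (paths.insert (cur.1 + d.2.1, cur.2 + d.2.2) (path ++ d.1)).keys,
                k = start ∨ pvValid grid k := by
              rw [hkeys']
              intro k hk
              rcases List.mem_append.mp hk with hk | hk
              · exact hv k hk
              · rw [List.mem_singleton.mp hk]
                exact Or.inr ⟨row, hg, by rw [hr]; rfl⟩
            have hencmap : (qB ++ [(cur.1 + d.2.1, cur.2 + d.2.2)]).map
                  (fun p => (p, (paths.insert (cur.1 + d.2.1, cur.2 + d.2.2) (path ++ d.1)).getD p ""))
                = qB.map (fun p => (p, paths.getD p ""))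
                  ++ [((cur.1 + d.2.1, cur.2 + d.2.2), path ++ d.1)] := by
              rw [List.map_append]
              congr 1
              · exact List.map_congr_left (fun p hp => by
                  rw [PySem.Dict.getD_insert_of_ne _ _ _ (hne p hp)])
              · simp [PySem.Dict.getD_insert_self]
            rw [hkeys'.symm, hencmap.symm]
            obtain ⟨c1, c2, c3, c4, c5, c6⟩ := ih _ _ hnd' hq' hv'
            refine ⟨c1, c2, c3, c4, ?_, ?_⟩
            · intro k hk
              rcases c5 k hk with hk' | hk'
              · rw [hkeys'] at hk'
                rcases List.mem_append.mp hk' with hk'' | hk''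
                · exact Or.inl hk''
                · refine Or.inr ?_
                  have hpre := pv_foldB_queue grid cur path t
                    (paths.insert (cur.1 + d.2.1, cur.2 + d.2.2) (path ++ d.1),
                     qB ++ [(cur.1 + d.2.1, cur.2 + d.2.2)])
                  exact hpre.sublist.mem (by
                    rw [List.mem_singleton.mp hk'']
                    exact List.mem_append_right _ (List.mem_singleton_self _))
              · exact Or.inr hk'
            · have hsize : (paths.insert (cur.1 + d.2.1, cur.2 + d.2.2) (path ++ d.1)).size
                  = paths.size + 1 := by
                rw [PySem.Dict.size_insert, hcB]; simp
              rw [hsize] at c6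
              simp only [List.length_append, List.length_cons, List.length_nil] at c6 ⊢
              omega

-- main bisimulation: A's queue BFS, run against B's layered BFS resumed mid-layer;
-- A's queue is rest ++ acc enriched with the paths recorded so far
lemma pv_rel (grid : List (List String)) (start target : Int × Int) :
    ∀ (fuelL : Nat) (rest : List (Int × Int)), ∀ (acc : List (Int × Int))
      (paths : PySem.Dict (Int × Int) String) (fuelA : Nat),
    paths.keys.Nodup →
    (∀ p ∈ rest ++ acc, (paths.get? p).isSome) →
    (∀ k ∈ paths.keys, k = start ∨ pvValid grid k) →
    (target ∈ paths.keys → target ∈ rest ++ acc) →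
    (rest ++ acc).length + (4 * grid.length * pvMaxRowLen grid + 1) < fuelA + paths.size →
    (4 * grid.length * pvMaxRowLen grid + 1) + 1 + acc.length ≤ fuelL + paths.size →
    pvBfsLoopA grid target fuelA ((rest ++ acc).map (fun p => (p, paths.getD p ""))) paths.keys
      = (pvLayCont grid fuelL rest acc paths).get? target := by
  intro fuelL
  induction fuelL with
  | zero =>
    intro rest acc paths fuelA hnd hq hv ht hfA hfL
    exfalso
    have hb := pv_keys_le grid start paths.keys hnd hv
    rw [pv_keys_length] at hb
    omega
  | succ fL ihL =>
    intro rest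
    induction rest with
    | nil =>
      intro acc paths fuelA hnd hq hv ht hfA hfL
      cases acc with
      | nil =>
        have hnt : target ∉ paths.keys := fun h => by simpa using ht h
        have hA : pvBfsLoopA grid target fuelA [] paths.keys = none := by cases fuelA <;> rfl
        simp only [List.append_nil, List.map_nil]
        rw [hA, show pvLayCont grid (fL + 1) [] [] paths = paths from rfl]
        exact ((PySem.Dict.get?_eq_none_iff_not_mem_keys paths target).mpr hnt).symm
      | cons a t =>
        rw [show pvLayCont grid (fL + 1) [] (a :: t) paths = pvLayCont grid fL (a :: t) [] paths from rfl]
        have hres := ihL (a :: t) [] paths fuelA hnd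
          (by intro p hp; exact hq p (by simpa using (by simpa using hp : p ∈ a :: t)))
          hv
          (by intro h; simpa using ht h)
          (by simp only [List.append_nil, List.nil_append] at hfA ⊢; exact hfA)
          (by simp only [List.length_nil, List.length_cons] at hfL ⊢; omega)
        simpa using hres
    | cons cur rest' ihR =>
      intro acc paths fuelA hnd hq hv ht hfA hfL
      cases fuelA with
      | zero =>
        exfalso
        have hb := pv_keys_le grid start paths.keys hnd hv
        rw [pv_keys_length] at hb
        simp only [List.cons_append, List.length_cons] at hfA
        omega
      | succ fA =>
        simp only [List.cons_append, List.map_cons]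
        rw [pvBfsLoopA]
        by_cases hct : cur = target
        · subst hct
          rw [if_pos rfl]
          have hcur : (paths.get? cur).isSome := hq cur (by simp)
          obtain ⟨v, hv'⟩ := Option.isSome_iff_exists.mp hcur
          have hR : (pvLayCont grid (fL + 1) (cur :: rest') acc paths).get? cur = some v := by
            rw [pv_laycont_mono grid (fL + 1) (cur :: rest') acc paths cur hcur]
            exact hv'
          rw [hR, PySem.Dict.getD_eq_get?_getD, hv']
          rfl
        · rw [if_neg hct]
          obtain ⟨c1, c2, c3, c4, c5, c6⟩ := pv_expand_rel grid start cur (paths.getD cur "")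
            pvDirs paths (rest' ++ acc) hnd
            (fun p hp => hq p (by simpa using Or.inr (by simpa using hp)))
            hv
          rw [c1]
          have hsplit := pv_foldB_prepend grid cur (paths.getD cur "") pvDirs paths rest' acc
          rw [hsplit] at c2 c3 c4 c5 c6
          rw [hsplit]
          have hacc : acc <+: (pvDirs.foldl (pvStepB grid cur (paths.getD cur "")) (paths, acc)).2 :=
            pv_foldB_queue grid cur (paths.getD cur "") pvDirs (paths, acc)
          have hRHS : pvLayCont grid (fL + 1) (cur :: rest') acc paths
              = pvLayCont grid (fL + 1) rest'
                  (pvDirs.foldl (pvStepB grid cur (paths.getD cur "")) (paths, acc)).2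
                  (pvDirs.foldl (pvStepB grid cur (paths.getD cur "")) (paths, acc)).1 := rfl
          rw [hRHS]
          refine ihR (pvDirs.foldl (pvStepB grid cur (paths.getD cur "")) (paths, acc)).2
            (pvDirs.foldl (pvStepB grid cur (paths.getD cur "")) (paths, acc)).1 fA
            c2 c3 c4 ?_ ?_ ?_
          · intro h
            rcases c5 target h with h' | h'
            · have h2 := ht (by simpa using h')
              simp only [List.cons_append, List.mem_cons, List.mem_append] at h2
              rcases h2 with h3 | h3 | h3
              · exact absurd h3.symm hct
              · exact List.mem_append_left _ h3
              · exact List.mem_append_right _ (hacc.sublist.mem h3)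
            · exact h'
          · simp only [List.length_append, List.length_cons] at hfA c6 ⊢
            omega
          · simp only [List.length_append] at hfL c6 ⊢
            omega

-- A's whole per-target BFS returns exactly the lookup of the target in B's single layered BFS
lemma pv_bfs_eq_lookup (grid : List (List String)) (start target : Int × Int) :
    pvBfs grid start target
      = (pvBfsLayers grid (pvFuelB grid) (PySem.Dict.empty.insert start "") [start]).get? target := by
  have hkeys : ((PySem.Dict.empty.insert start "" : PySem.Dict (Int × Int) String)).keys = [start] := by
    rw [PySem.Dict.keys_insert_of_not_contains _ _ (PySem.Dict.contains_empty start),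
      PySem.Dict.keys_empty, List.nil_append]
  have hsize : ((PySem.Dict.empty.insert start "" : PySem.Dict (Int × Int) String)).size = 1 := by
    rw [PySem.Dict.size_insert, PySem.Dict.contains_empty]
    simp [PySem.Dict.size_empty]
  have hrel := pv_rel grid start target ((4 * grid.length * pvMaxRowLen grid + 1) + 1)
    [start] [] (PySem.Dict.empty.insert start "") (pvFuel grid)
    (by rw [hkeys]; exact List.nodup_singleton _)
    (by intro p hp
        have hp' : p = start := by simpa using hp
        subst hp'
        rw [PySem.Dict.get?_insert_self]
        rfl)
    (by intro k hk; rw [hkeys] at hk; exact Or.inl (List.mem_singleton.mp hk))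
    (by intro h; rw [hkeys] at h; simpa using h)
    (by rw [hsize]; unfold pvFuel; simp only [List.append_nil, List.length_cons, List.length_nil]; omega)
    (by rw [hsize]; simp only [List.length_nil]; omega)
  rw [hkeys] at hrel
  simp only [List.append_nil, List.map_cons, List.map_nil, PySem.Dict.getD_insert_self] at hrel
  unfold pvBfs
  rw [show PySem.Set.add (PySem.Set.empty : PySem.Set (Int × Int)) start = [start] from
    PySem.Set.add_of_not_mem (by simp [PySem.Set.empty])]
  rw [hrel]
  rw [show pvFuelB grid = (4 * grid.length * pvMaxRowLen grid + 1) + 1 + 1 by unfold pvFuelB; omega]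
  rfl

-- Option ((pill, path)) as A's accumulator pair
def pvEnc (o : Option ((Int × Int) × String)) : Option (Int × Int) × Option String :=
  match o with
  | none => (none, none)
  | some t => (some t.1, some t.2)

-- A's strict-< selection scan over the pills IS Python's stable min over the reachable ones
lemma pv_select (L : (Int × Int) → Option String) :
    ∀ (pills : List (Int × Int)) (bo : Option ((Int × Int) × String)),
    pills.foldl (fun acc pill =>
      match L pill, acc.2 with
      | some p, none => (some pill, some p)
      | some p, some sp => if PySem.Str.len p < PySem.Str.len sp then (some pill, some p) else acc
      | none, _ => acc) (pvEnc bo)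
    = pvEnc ((pills.filterMap (fun pill => (L pill).map (fun p => (pill, p)))).foldl
        (fun acc x => match acc with
          | none => some x
          | some m => if PySem.Str.len x.2 < PySem.Str.len m.2 then some x else some m) bo) := by
  intro pills
  induction pills with
  | nil => intro bo; rfl
  | cons pill t ih =>
    intro bo
    simp only [List.foldl_cons, List.filterMap_cons]
    cases hL : L pill with
    | none => exact ih bo
    | some p =>
      cases bo with
      | none =>
        simp only [pvEnc, Option.map_some, List.foldl_cons]
        exact ih (some (pill, p))
      | some m =>
        simp only [pvEnc, Option.map_some, List.foldl_cons]
        by_cases hlt : PySem.Str.len p < PySem.Str.len m.2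
        · simp only [if_pos hlt]
          exact ih (some (pill, p))
        · simp only [if_neg hlt]
          exact ih (some m)

-- ===== VERDICT (by name: the statement is the Claim_ definition above) =====
theorem find_nearest_pill_spec : Claim_equal_find_nearest_pill := by
  intro grid cp pills _
  unfold Spec_find_nearest_pill find_nearest_pill find_nearest_pill_alt
  have hfun : (fun (acc : Option (Int × Int) × Option String) pill =>
      match pvBfs grid cp pill, acc.2 with
      | some p, none => (some pill, some p)
      | some p, some sp => if PySem.Str.len p < PySem.Str.len sp then (some pill, some p) else acc
      | none, _ => acc)
      = (fun (acc : Option (Int × Int) × Option String) pill =>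
      match (pvBfsLayers grid (pvFuelB grid) (PySem.Dict.empty.insert cp "") [cp]).get? pill, acc.2 with
      | some p, none => (some pill, some p)
      | some p, some sp => if PySem.Str.len p < PySem.Str.len sp then (some pill, some p) else acc
      | none, _ => acc) := by
    funext acc pill
    rw [pv_bfs_eq_lookup]
  rw [hfun]
  have h := pv_select (fun pill => (pvBfsLayers grid (pvFuelB grid) (PySem.Dict.empty.insert cp "") [cp]).get? pill) pills none
  have hdef : List.foldl (fun acc x => match acc with
        | none => some x
        | some m => if PySem.Str.len x.2 < PySem.Str.len m.2 then some x else some m) none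
      (List.filterMap (fun pill => Option.map (fun p => (pill, p))
        ((pvBfsLayers grid (pvFuelB grid) (PySem.Dict.empty.insert cp "") [cp]).get? pill)) pills)
      = PySem.List.min? (List.filterMap (fun pill => Option.map (fun p => (pill, p))
        ((pvBfsLayers grid (pvFuelB grid) (PySem.Dict.empty.insert cp "") [cp]).get? pill)) pills)
        (fun t => PySem.Str.len t.2) := by
    simp only [PySem.List.min?]
    congr 1
    funext acc x
    cases acc <;> rfl
  rw [hdef] at h
  refine Eq.trans (by exact h) ?_
  cases hm : PySem.List.min? (List.filterMap (fun pill => Option.map (fun p => (pill, p))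
      ((pvBfsLayers grid (pvFuelB grid) (PySem.Dict.empty.insert cp "") [cp]).get? pill)) pills)
      (fun t => PySem.Str.len t.2) with
  | none => simp only [hm]; rfl
  | some best => simp only [hm]; rfl
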